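-- pv_equiv track=rewrite | github.com/spcameron/static-site-generator | src/block_markdown.py | is_heading
-- ===== SOURCE A (Python) =====
-- def is_heading(block):
--     split_on_first_space = block.split(" ", 1)
--     leading_text = split_on_first_space[0]
--
--     if len(leading_text) < 1 or len(leading_text) > 6:
--         return False
--
--     for c in leading_text:
--         if c != "#":
--             return False
--
--     return True
-- ===== SOURCE B (Python) =====
-- def is_heading(block):
--     stripped = block.lstrip("#")
--     count = len(block) - len(stripped)
--     return 1 <= count <= 6 and (stripped == "" or stripped.startswith(" "))
-- ===== Notes on version B (the rewrite author's own statement) =====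
-- stated objective: simpler
-- what changed: B counts the leading '#' run via lstrip and checks that the run is 1-6 long and followed by a space or end-of-string, instead of splitting on the first space and scanning the first token character by character.
import Mathlib
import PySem

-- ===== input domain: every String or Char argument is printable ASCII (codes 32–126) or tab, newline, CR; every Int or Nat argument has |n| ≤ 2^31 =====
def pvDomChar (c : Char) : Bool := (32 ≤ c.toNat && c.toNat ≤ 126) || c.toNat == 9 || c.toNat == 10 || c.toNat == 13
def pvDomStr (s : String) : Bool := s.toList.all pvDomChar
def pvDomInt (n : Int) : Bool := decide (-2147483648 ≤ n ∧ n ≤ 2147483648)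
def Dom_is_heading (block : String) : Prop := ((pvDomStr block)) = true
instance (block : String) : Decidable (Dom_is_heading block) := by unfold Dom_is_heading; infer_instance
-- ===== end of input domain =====

-- B checks the leading '#' run (via lstrip) and its boundary directly, instead of
-- splitting on the first space and scanning the first token: simpler, same cost.

-- ===== PORT A =====
def is_heading (block : String) : Bool :=
  -- block.split(" ", 1): sep " " is nonempty so splitMax? is some, and a split result
  -- is never empty so index 0 exists; the getD defaults are unreachable.
  let split_on_first_space := (PySem.Str.splitMax? block " " 1).getD []
  let leading_text := (PySem.List.pyGet? split_on_first_space 0).getD ""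
  if PySem.Str.len leading_text < 1 ∨ PySem.Str.len leading_text > 6 then false
  else
    -- for c in leading_text: if c != "#": return False / return True
    leading_text.toList.all (fun c => c == '#')

-- ===== PORT B =====
def is_heading_alt (block : String) : Bool :=
  -- block.lstrip("#") ported by hand as dropWhile on the char list (exact for a
  -- one-character strip set); stripped.startswith(" ") via PySem.Chars.startswith.
  let stripped := block.toList.dropWhile (fun c => c == '#')
  let count : Int := PySem.Str.len block - (stripped.length : Int)
  (decide (1 ≤ count) && decide (count ≤ 6)) &&
    (stripped.isEmpty || PySem.Chars.startswith stripped [' '])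

-- ===== PRECONDITION & SPEC =====
def Spec_is_heading (block : String) (out : Bool) : Prop := out = is_heading_alt block
instance (block : String) (out : Bool) : Decidable (Spec_is_heading block out) := by unfold Spec_is_heading; infer_instance

-- ===== CLAIM (what is proved, stated in full; the proofs are below) =====
def Claim_equal_is_heading : Prop := ∀ (block : String), Dom_is_heading block → Spec_is_heading block (is_heading block)

-- ===== LEMMAS AND PROOFS =====

-- A's result as a function of the character list: the pre-space prefix must be
-- 1-6 chars, all '#'.
def pvACore (l : List Char) : Bool :=
  let t := l.takeWhile (fun c => c ≠ ' ')
  if (t.length : Int) < 1 ∨ (t.length : Int) > 6 then false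
  else t.all (fun c => c == '#')

-- B's result as a function of the character list.
def pvBCore (l : List Char) : Bool :=
  let d := l.dropWhile (fun c => c == '#')
  (decide (1 ≤ (l.length : Int) - (d.length : Int)) &&
   decide ((l.length : Int) - (d.length : Int) ≤ 6)) &&
    (d.isEmpty || List.isPrefixOf [' '] d)

-- splitOnMax.go with maxsplit 0 stops at once: the head of the result is the one
-- piece already accumulated.
lemma go_zero_head (fuel : ℕ) (l cur a : List Char) :
    (PySem.Chars.splitOnMax.go [' '] fuel 0 l cur [a]).head? = some a := by
  cases fuel with
  | zero => simp [PySem.Chars.splitOnMax.go]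
  | succ f =>
    cases l with
    | nil => simp [PySem.Chars.splitOnMax.go]
    | cons c rest => simp [PySem.Chars.splitOnMax.go]

-- With maxsplit 1 and enough fuel, the first piece of the split is exactly the
-- prefix of l before the first space.
lemma go_one_head (l : List Char) : ∀ (fuel : ℕ) (cur : List Char), l.length ≤ fuel →
    (PySem.Chars.splitOnMax.go [' '] fuel 1 l cur []).head? =
      some (cur.reverse ++ l.takeWhile (fun c => c ≠ ' ')) := by
  induction l with
  | nil =>
    intro fuel cur _
    cases fuel with
    | zero => simp [PySem.Chars.splitOnMax.go]
    | succ f => simp [PySem.Chars.splitOnMax.go]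
  | cons c rest ih =>
    intro fuel cur h
    cases fuel with
    | zero => simp at h
    | succ f =>
      by_cases hc : c = ' '
      · subst hc
        simp [PySem.Chars.splitOnMax.go, List.isPrefixOf, go_zero_head]
      · have hpre : List.isPrefixOf [' '] (c :: rest) = false := by
          simp [List.isPrefixOf]
          exact fun h' => hc h'.symm
        have hf : rest.length ≤ f := by simpa using h
        have hstep : (PySem.Chars.splitOnMax.go [' '] (f+1) 1 (c :: rest) cur []
            : List (List Char)) = PySem.Chars.splitOnMax.go [' '] f 1 rest (c :: cur) [] := by
          simp [PySem.Chars.splitOnMax.go, hpre]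
        rw [hstep, ih f (c :: cur) hf]
        simp [hc]

-- Port A computes pvACore of the character list.
lemma is_heading_eq (block : String) : is_heading block = pvACore block.toList := by
  have hgo := go_one_head block.toList (block.toList.length + 1) [] (Nat.le_succ _)
  simp only [List.reverse_nil, List.nil_append] at hgo
  rcases hg : PySem.Chars.splitOnMax.go [' '] (block.toList.length + 1) 1
      block.toList [] [] with _ | ⟨p, ps⟩
  · rw [hg] at hgo; simp at hgo
  · rw [hg] at hgo
    simp only [List.head?_cons, Option.some.injEq] at hgo
    have hg' : PySem.Chars.splitOnMax.go [' '] (block.length + 1) 1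
        block.toList [] [] = p :: ps := by
      rw [show block.length = block.toList.length from String.length_toList.symm]
      exact hg
    have hsplit : PySem.Str.splitMax? block " " 1 =
        some (List.map String.ofList (p :: ps)) := by
      unfold PySem.Str.splitMax? PySem.Chars.splitMax? PySem.Chars.splitOnMax
      norm_num
      exact ⟨p :: ps, ⟨by simp, hg'⟩, by simp⟩
    unfold is_heading pvACore
    rw [hsplit]
    simp only [Option.getD_some, hgo, PySem.Str.len]
    simp

-- Port B computes pvBCore of the character list.
lemma is_heading_alt_eq (block : String) :
    is_heading_alt block = pvBCore block.toList := by
  simp [is_heading_alt, pvBCore, PySem.Chars.startswith, PySem.Str.len]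

-- The common value both cores take once the string is decomposed as
-- (run of '#'s p) ++ (rest d not starting with '#').
def pvVal (p d : List Char) : Bool :=
  (decide (1 ≤ (p.length : Int)) && decide ((p.length : Int) ≤ 6)) &&
    (d.isEmpty || List.isPrefixOf [' '] d)

lemma takeWhile_nonspace_of_hash {p : List Char} (hp : ∀ x ∈ p, x = '#') :
    p.takeWhile (fun c => c ≠ ' ') = p := by
  apply List.takeWhile_eq_self_iff.mpr
  intro x hx
  simp [hp x hx]

lemma all_hash_of_hash {p : List Char} (hp : ∀ x ∈ p, x = '#') :
    p.all (fun c => c == '#') = true := by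
  simp only [List.all_eq_true]
  intro x hx
  simp [hp x hx]

lemma pvACore_split (p d : List Char) (hp : ∀ x ∈ p, x = '#')
    (hd : ∀ c rest, d = c :: rest → (c == '#') = false) :
    pvACore (p ++ d) = pvVal p d := by
  have ht : (p ++ d).takeWhile (fun c => c ≠ ' ') =
      p ++ d.takeWhile (fun c => c ≠ ' ') := by
    rw [List.takeWhile_append, takeWhile_nonspace_of_hash hp]
    simp
  cases d with
  | nil =>
    have hpt := takeWhile_nonspace_of_hash hp
    simp only [pvACore, pvVal, List.append_nil, hpt, List.isEmpty_nil,
      Bool.true_or, Bool.and_true]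
    split_ifs with hcond
    · symm
      simp only [Bool.and_eq_false_iff, decide_eq_false_iff_not]
      omega
    · rw [all_hash_of_hash hp]
      symm
      simp only [Bool.and_eq_true, decide_eq_true_eq]
      omega
  | cons c rest =>
    have hc : (c == '#') = false := hd c rest rfl
    by_cases hcs : c = ' '
    · subst hcs
      simp only [pvACore, pvVal, ht, List.takeWhile_cons, ne_eq,
        not_true_eq_false, decide_false, Bool.false_eq_true, if_false,
        List.append_nil, List.isEmpty_cons, List.isPrefixOf, BEq.rfl,
        Bool.or_true, Bool.and_true]
      split_ifs with hcond
      · symm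
        simp only [Bool.and_eq_false_iff, decide_eq_false_iff_not]
        omega
      · rw [all_hash_of_hash hp]
        symm
        simp only [Bool.and_eq_true, decide_eq_true_eq]
        omega
    · have hpre : List.isPrefixOf [' '] (c :: rest) = false := by
        simp [List.isPrefixOf]
        exact fun h' => hcs h'.symm
      simp only [pvACore, pvVal, ht, List.takeWhile_cons, ne_eq, hcs,
        not_false_eq_true, decide_true, if_true, List.isEmpty_cons, hpre,
        Bool.or_false, Bool.and_false]
      have hall : (p ++ c :: rest.takeWhile (fun c => c ≠ ' ')).all
          (fun c => c == '#') = false := by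
        simp [List.all_append, hc]
      rw [hall]
      split_ifs <;> rfl

lemma dropWhile_hash_append (p d : List Char) (hp : ∀ x ∈ p, x = '#')
    (hd : ∀ c rest, d = c :: rest → (c == '#') = false) :
    (p ++ d).dropWhile (fun c => c == '#') = d := by
  induction p with
  | nil =>
    cases d with
    | nil => simp
    | cons c rest => simp [hd c rest rfl]
  | cons a p ih =>
    have ha : a = '#' := hp a (by simp)
    simp only [List.cons_append, List.dropWhile_cons, ha]
    simpa using ih (fun x hx => hp x (by simp [hx]))

lemma pvBCore_split (p d : List Char) (hp : ∀ x ∈ p, x = '#')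
    (hd : ∀ c rest, d = c :: rest → (c == '#') = false) :
    pvBCore (p ++ d) = pvVal p d := by
  have hdrop := dropWhile_hash_append p d hp hd
  simp only [pvBCore, hdrop, pvVal]
  have hlen : (((p ++ d).length : Int)) - (d.length : Int) = (p.length : Int) := by
    push_cast [List.length_append]
    ring
  rw [hlen]

-- The heart of the equivalence: on any character list the two cores agree.
lemma core_eq (l : List Char) : pvACore l = pvBCore l := by
  have hsplit : l.takeWhile (fun c => c == '#') ++ l.dropWhile (fun c => c == '#') = l :=
    List.takeWhile_append_dropWhile
  have hp : ∀ x ∈ l.takeWhile (fun c => c == '#'), x = '#' := by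
    intro x hx
    simpa using List.mem_takeWhile_imp hx
  have hd : ∀ c rest, l.dropWhile (fun c => c == '#') = c :: rest → (c == '#') = false := by
    intro c rest hcr
    have hne : l.dropWhile (fun c => c == '#') ≠ [] := by simp [hcr]
    have := List.head_dropWhile_not (fun c => c == '#') hne
    simp only [hcr, List.head_cons] at this
    exact this
  rw [← hsplit, pvACore_split _ _ hp hd, pvBCore_split _ _ hp hd]

-- ===== VERDICT (by name: the statement is the Claim_ definition above) =====
theorem is_heading_spec : Claim_equal_is_heading := by
  intro block _
  unfold Spec_is_heading
  rw [is_heading_eq, is_heading_alt_eq, core_eq]
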